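-- pv_equiv track=rewrite | github.com/Nenavathnaresh/Python_DSA | DP-Problems/Medium/special-keyboard.py | optimalKeys
-- ===== SOURCE A (Python) =====
-- def optimalKeys(N):
--     if N <= 6:
--         return N
--
--     dp = [0] * (N + 1)
--
--     for i in range(1, 7):
--         dp[i] = i
--
--     for i in range(7, N + 1):
--         for j in range(i - 3, 0, -1):
--             dp[i] = max(dp[i], dp[j] * (i - j - 1))
--
--     return dp[N]
-- ===== SOURCE B (Python) =====
-- def optimalKeys(N):
--     if N <= 6:
--         return N
--     dp = [0, 1, 2, 3, 4, 5, 6]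
--     for i in range(7, N + 1):
--         dp.append(max(2 * dp[i - 3], 3 * dp[i - 4], 4 * dp[i - 5], 5 * dp[i - 6]))
--     return dp[N]
-- ===== Notes on version B (the rewrite author's own statement) =====
-- stated objective: faster
-- what changed: Replaces the O(N^2) DP that scans every break point j=i-3..1 with an O(N) DP that appends max(2*dp[i-3], 3*dp[i-4], 4*dp[i-5], 5*dp[i-6]), justified by proving every break point j <= i-7 is dominated by j+4.
import Mathlib
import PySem

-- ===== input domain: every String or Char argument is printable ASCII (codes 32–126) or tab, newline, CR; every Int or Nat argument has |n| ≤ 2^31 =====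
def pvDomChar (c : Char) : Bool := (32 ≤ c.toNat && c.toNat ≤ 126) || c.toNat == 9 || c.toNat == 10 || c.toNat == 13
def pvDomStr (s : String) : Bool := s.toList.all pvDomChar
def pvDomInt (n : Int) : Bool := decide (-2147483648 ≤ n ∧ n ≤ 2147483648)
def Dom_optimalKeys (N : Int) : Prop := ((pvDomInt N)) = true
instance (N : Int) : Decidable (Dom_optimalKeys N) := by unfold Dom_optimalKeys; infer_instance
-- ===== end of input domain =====

-- B replaces A's O(N^2) scan over all break points with an O(N) DP that checks only
-- the last four break points (proved sufficient by a domination argument).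

-- ===== PORT A =====
-- all list indices below are provably in range, so List.set / pyGetD are exact
def optimalKeys (N : Int) : Int :=
  if N ≤ 6 then N
  else
    let dp : List Int := List.replicate (N + 1).toNat 0
    let dp := (PySem.List.pyRange 1 7 1).foldl (fun dp i => dp.set i.toNat i) dp
    let dp := (PySem.List.pyRange 7 (N + 1) 1).foldl (fun dp i =>
      (PySem.List.pyRange (i - 3) 0 (-1)).foldl (fun dp j =>
        dp.set i.toNat (max (PySem.List.pyGetD dp i 0) (PySem.List.pyGetD dp j 0 * (i - j - 1)))) dp) dp
    PySem.List.pyGetD dp N 0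

-- ===== PORT B =====
def optimalKeys_alt (N : Int) : Int :=
  if N ≤ 6 then N
  else
    let dp := (PySem.List.pyRange 7 (N + 1) 1).foldl (fun dp i =>
      dp ++ [max (max (max (2 * PySem.List.pyGetD dp (i - 3) 0)
                           (3 * PySem.List.pyGetD dp (i - 4) 0))
                      (4 * PySem.List.pyGetD dp (i - 5) 0))
                 (5 * PySem.List.pyGetD dp (i - 6) 0)]) [0, 1, 2, 3, 4, 5, 6]
    PySem.List.pyGetD dp N 0

-- ===== PRECONDITION & SPEC =====
def Spec_optimalKeys (N : Int) (out : Int) : Prop := out = optimalKeys_alt N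
instance (N : Int) (out : Int) : Decidable (Spec_optimalKeys N out) := by unfold Spec_optimalKeys; infer_instance

-- ===== CLAIM (what is proved, stated in full; the proofs are below) =====
def Claim_equal_optimalKeys : Prop := ∀ (N : Int), Dom_optimalKeys N → Spec_optimalKeys N (optimalKeys N)

-- ===== LEMMAS AND PROOFS =====

-- reference table: pvG n = [g 0, …, g n] where g is A's recurrence
def pvG : Nat → List Int
  | 0 => [0]
  | n + 1 =>
    let l := pvG n
    let i : Int := (n : Int) + 1
    l ++ [if i ≤ 6 then i
          else (PySem.List.pyRange (i - 3) 0 (-1)).foldl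
                 (fun acc j => max acc (PySem.List.pyGetD l j 0 * (i - j - 1))) 0]

def pvg (n : Nat) : Int := (pvG n).getD n 0

theorem length_pvG (n : Nat) : (pvG n).length = n + 1 := by
  induction n with
  | zero => rfl
  | succ n ih => simp [pvG, ih]

theorem pvG_succ (n : Nat) : pvG (n + 1) = pvG n ++ [pvg (n + 1)] := by
  conv_lhs => rw [pvG]
  congr 2
  show _ = (pvG (n + 1)).getD (n + 1) 0
  conv_rhs => rw [pvG]
  rw [List.getD_append_right _ _ _ _ (by rw [length_pvG])]
  simp [length_pvG]

theorem getD_pvG {n k : Nat} (h : k ≤ n) : (pvG n).getD k 0 = pvg k := by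
  induction n with
  | zero => interval_cases k; rfl
  | succ n ih =>
    rcases Nat.lt_or_ge k (n + 1) with hk | hk
    · rw [pvG_succ, List.getD_append _ _ _ _ (by rw [length_pvG]; omega)]
      exact ih (by omega)
    · have : k = n + 1 := by omega
      subst this; rfl

-- value of pvg on the small cases
theorem pvg_small {n : Nat} (h : n ≤ 6) : pvg n = (n : Int) := by
  interval_cases n <;> decide

-- A's inner scan, as pvg's recurrence for n ≥ 7
theorem pvg_big {n : Nat} (h : 7 ≤ n) :
    pvg n = (PySem.List.pyRange ((n : Int) - 3) 0 (-1)).foldl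
              (fun acc j => max acc (pvg j.toNat * ((n : Int) - j - 1))) 0 := by
  obtain ⟨m, rfl⟩ : ∃ m, n = m + 1 := ⟨n - 1, by omega⟩
  show (pvG (m + 1)).getD (m + 1) 0 = _
  conv_lhs => rw [pvG]
  rw [List.getD_append_right _ _ _ _ (by rw [length_pvG])]
  simp only [length_pvG, Nat.sub_self, List.getD_cons_zero]
  rw [if_neg (by omega)]
  have : ((m : Nat) + 1 : Int) = ((m + 1 : Nat) : Int) := by push_cast; ring
  rw [this]
  apply PySem.List.foldl_congr_mem
  intro acc j hj
  rw [PySem.List.mem_pyRange_neg_one] at hj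
  rw [PySem.List.pyGetD_of_nonneg _ _ (by omega),
      getD_pvG (show j.toNat ≤ m by omega)]

-- fold-of-max bound lemmas
theorem foldl_max_le {t : Int → Int} {l : List Int} {c b : Int}
    (hc : c ≤ b) (h : ∀ j ∈ l, t j ≤ b) :
    l.foldl (fun a j => max a (t j)) c ≤ b := by
  induction l generalizing c with
  | nil => exact hc
  | cons x xs ih =>
    exact ih (max_le hc (h x (by simp))) (fun j hj => h j (by simp [hj]))

theorem le_foldl_max_init {t : Int → Int} {l : List Int} {c : Int} :
    c ≤ l.foldl (fun a j => max a (t j)) c := by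
  induction l generalizing c with
  | nil => exact le_refl _
  | cons x xs ih => exact le_trans (le_max_left _ _) ih

theorem le_foldl_max_mem {t : Int → Int} {l : List Int} {c : Int} {j : Int}
    (hj : j ∈ l) : t j ≤ l.foldl (fun a j => max a (t j)) c := by
  induction l generalizing c with
  | nil => cases hj
  | cons x xs ih =>
    rcases List.mem_cons.mp hj with rfl | hj
    · exact le_trans (le_max_right _ _) le_foldl_max_init
    · exact ih hj

theorem pvg_nonneg (n : Nat) : 0 ≤ pvg n := by
  rcases Nat.lt_or_ge n 7 with h | h
  · rw [pvg_small (by omega)]; positivity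
  · rw [pvg_big h]; exact le_foldl_max_init

-- key growth fact: adding 4 keystrokes at least triples the output
theorem pvg_step {j : Nat} (hj : 1 ≤ j) : 3 * pvg j ≤ pvg (j + 4) := by
  rcases Nat.lt_or_ge j 3 with h | h
  · interval_cases j <;> decide
  · have h7 : 7 ≤ j + 4 := by omega
    rw [pvg_big h7]
    have hmem : (j : Int) ∈ PySem.List.pyRange (((j + 4 : Nat) : Int) - 3) 0 (-1) := by
      rw [PySem.List.mem_pyRange_neg_one]; constructor <;> push_cast <;> omega
    have hle := le_foldl_max_mem (t := fun x => pvg x.toNat * (((j + 4 : Nat) : Int) - x - 1))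
      (c := 0) hmem
    calc 3 * pvg j = pvg (j : Int).toNat * (((j + 4 : Nat) : Int) - (j : Int) - 1) := by
          simp; ring
      _ ≤ _ := hle

-- the four-candidate maximum of B
def pvC (n : Nat) : Int :=
  max (max (max (2 * pvg (n - 3)) (3 * pvg (n - 4))) (4 * pvg (n - 5))) (5 * pvg (n - 6))

-- every break point j ≤ n-7 is dominated by break point j+4
theorem term_le_pvC {n : Nat} (hn : 7 ≤ n) :
    ∀ (m : Nat) (j : Int), 1 ≤ j → j ≤ (n : Int) - 3 → ((n : Int) - 3 - j).toNat ≤ m →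
      pvg j.toNat * ((n : Int) - j - 1) ≤ pvC n := by
  intro m
  induction m using Nat.strong_induction_on with
  | _ m ih =>
    intro j h1 h2 hm
    rcases (by omega : j = (n:Int) - 3 ∨ j = (n:Int) - 4 ∨ j = (n:Int) - 5 ∨ j = (n:Int) - 6 ∨ j ≤ (n:Int) - 7) with rfl | rfl | rfl | rfl | hsmall
    · refine le_trans (le_of_eq ?_) (le_max_of_le_left (le_max_of_le_left (le_max_left _ _)))
      rw [show ((n:Int) - 3).toNat = n - 3 by omega]; ring_nf
    · refine le_trans (le_of_eq ?_) (le_max_of_le_left (le_max_of_le_left (le_max_right _ _)))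
      rw [show ((n:Int) - 4).toNat = n - 4 by omega]; ring_nf
    · refine le_trans (le_of_eq ?_) (le_max_of_le_left (le_max_right _ _))
      rw [show ((n:Int) - 5).toNat = n - 5 by omega]; ring_nf
    · refine le_trans (le_of_eq ?_) (le_max_right _ _)
      rw [show ((n:Int) - 6).toNat = n - 6 by omega]; ring_nf
    · -- j ≤ n - 7 : dominated by j + 4
      have hstep : 3 * pvg j.toNat ≤ pvg (j.toNat + 4) := pvg_step (by omega)
      have hnn : 0 ≤ pvg j.toNat := pvg_nonneg _
      have h4 : (j + 4).toNat = j.toNat + 4 := by omega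
      have hcalc : pvg j.toNat * ((n : Int) - j - 1) ≤ pvg ((j + 4).toNat) * ((n : Int) - (j + 4) - 1) := by
        rw [h4]
        calc pvg j.toNat * ((n : Int) - j - 1)
            ≤ pvg j.toNat * (3 * ((n : Int) - (j + 4) - 1)) := by
              apply mul_le_mul_of_nonneg_left (by omega) hnn
          _ = (3 * pvg j.toNat) * ((n : Int) - (j + 4) - 1) := by ring
          _ ≤ pvg (j.toNat + 4) * ((n : Int) - (j + 4) - 1) := by
              apply mul_le_mul_of_nonneg_right hstep (by omega)
      exact le_trans hcalc (ih (((n : Int) - 3 - (j + 4)).toNat) (by omega) (j + 4) (by omega) (by omega) (le_refl _))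

-- main lemma: A's full scan equals B's four-candidate maximum
theorem pvg_eq_pvC {n : Nat} (hn : 7 ≤ n) : pvg n = pvC n := by
  rw [pvg_big hn]
  apply le_antisymm
  · apply foldl_max_le
    · have := pvg_nonneg (n - 3)
      calc (0:Int) ≤ 2 * pvg (n - 3) := by omega
        _ ≤ pvC n := le_max_of_le_left (le_max_of_le_left (le_max_left _ _))
    · intro j hj
      rw [PySem.List.mem_pyRange_neg_one] at hj
      exact term_le_pvC hn (((n:Int) - 3 - j).toNat) j (by omega) (by omega) (le_refl _)
  · have mem : ∀ k : Nat, 1 ≤ k → k ≤ n - 3 →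
        pvg k * ((n : Int) - (k : Int) - 1) ≤ (PySem.List.pyRange ((n : Int) - 3) 0 (-1)).foldl
          (fun acc j => max acc (pvg j.toNat * ((n : Int) - j - 1))) 0 := by
      intro k h1 h2
      have hmem : (k : Int) ∈ PySem.List.pyRange ((n : Int) - 3) 0 (-1) := by
        rw [PySem.List.mem_pyRange_neg_one]; constructor <;> omega
      have hle := le_foldl_max_mem (t := fun x => pvg x.toNat * ((n : Int) - x - 1)) (c := 0) hmem
      simpa using hle
    unfold pvC
    have c1 := mem (n - 3) (by omega) (le_refl _)
    have c2 := mem (n - 4) (by omega) (by omega)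
    have c3 := mem (n - 5) (by omega) (by omega)
    have c4 := mem (n - 6) (by omega) (by omega)
    apply max_le (max_le (max_le ?_ ?_) ?_) ?_
    · refine le_trans (le_of_eq ?_) c1
      have : ((n - 3 : Nat) : Int) = (n : Int) - 3 := by omega
      rw [this]; ring
    · refine le_trans (le_of_eq ?_) c2
      have : ((n - 4 : Nat) : Int) = (n : Int) - 4 := by omega
      rw [this]; ring
    · refine le_trans (le_of_eq ?_) c3
      have : ((n - 5 : Nat) : Int) = (n : Int) - 5 := by omega
      rw [this]; ring
    · refine le_trans (le_of_eq ?_) c4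
      have : ((n - 6 : Nat) : Int) = (n : Int) - 6 := by omega
      rw [this]; ring

-- B-side loop invariant: the append loop builds exactly the table pvG
theorem alt_fold : ∀ n : Nat, 6 ≤ n →
    (PySem.List.pyRange 7 ((n : Int) + 1) 1).foldl (fun dp i =>
      dp ++ [max (max (max (2 * PySem.List.pyGetD dp (i - 3) 0)
                           (3 * PySem.List.pyGetD dp (i - 4) 0))
                      (4 * PySem.List.pyGetD dp (i - 5) 0))
                 (5 * PySem.List.pyGetD dp (i - 6) 0)]) [0, 1, 2, 3, 4, 5, 6]
    = pvG n := by
  intro n hn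
  induction n, hn using Nat.le_induction with
  | base =>
    rw [PySem.List.pyRange_one_eq_nil (by norm_num)]
    decide
  | succ n hn ih =>
    rw [show ((n + 1 : Nat) : Int) + 1 = ((n : Int) + 1) + 1 by push_cast; ring,
        PySem.List.pyRange_one_succ_right (by omega), List.foldl_append, ih]
    have hread : ∀ d : Int, 0 ≤ d → d ≤ (n : Int) →
        PySem.List.pyGetD (pvG n) d 0 = pvg d.toNat := by
      intro d h0 hdn
      rw [PySem.List.pyGetD_of_nonneg _ _ h0, getD_pvG (by omega)]
    simp only [List.foldl]
    rw [hread ((n:Int) + 1 - 3) (by omega) (by omega),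
        hread ((n:Int) + 1 - 4) (by omega) (by omega),
        hread ((n:Int) + 1 - 5) (by omega) (by omega),
        hread ((n:Int) + 1 - 6) (by omega) (by omega),
        pvG_succ n, show pvg (n + 1) = pvC (n + 1) from pvg_eq_pvC (by omega)]
    unfold pvC
    rw [show ((n:Int) + 1 - 3).toNat = (n + 1) - 3 by omega,
        show ((n:Int) + 1 - 4).toNat = (n + 1) - 4 by omega,
        show ((n:Int) + 1 - 5).toNat = (n + 1) - 5 by omega,
        show ((n:Int) + 1 - 6).toNat = (n + 1) - 6 by omega]

-- A-side helpers
theorem set_concat_mid (front rest : List Int) (c v : Int) :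
    (front ++ c :: rest).set front.length v = front ++ v :: rest := by
  rw [List.set_append]; simp

theorem getD_concat_mid (front rest : List Int) (c d : Int) :
    (front ++ c :: rest).getD front.length d = c := by
  rw [List.getD_append_right _ _ _ _ (le_refl _)]; simp

-- A's inner loop: repeated in-place max-updates of cell i, cells below i only read
theorem inner_fold (i : Int) (front rest : List Int) (hf : front.length = i.toNat) (hi : 0 ≤ i) :
    ∀ (js : List Int) (c : Int), (∀ j ∈ js, 0 ≤ j ∧ j < i) →
    js.foldl (fun dp j => dp.set i.toNat (max (PySem.List.pyGetD dp i 0) (PySem.List.pyGetD dp j 0 * (i - j - 1)))) (front ++ c :: rest)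
    = front ++ (js.foldl (fun acc j => max acc (PySem.List.pyGetD front j 0 * (i - j - 1))) c) :: rest := by
  intro js
  induction js with
  | nil => intro c _; rfl
  | cons j js ih =>
    intro c hmem
    obtain ⟨hj0, hji⟩ := hmem j (by simp)
    have hl : j.toNat < front.length := by omega
    have hstep : (front ++ c :: rest).set i.toNat
        (max (PySem.List.pyGetD (front ++ c :: rest) i 0)
             (PySem.List.pyGetD (front ++ c :: rest) j 0 * (i - j - 1)))
        = front ++ (max c (PySem.List.pyGetD front j 0 * (i - j - 1))) :: rest := by
      rw [PySem.List.pyGetD_of_nonneg _ _ hi,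
          PySem.List.pyGetD_of_nonneg _ _ hj0, List.getD_append _ _ _ _ hl,
          ← PySem.List.pyGetD_of_nonneg _ _ hj0, ← hf, getD_concat_mid, set_concat_mid]
    simp only [List.foldl]
    rw [hstep]
    exact ih _ (fun x hx => hmem x (by simp [hx]))

-- A's first loop: writing 1..6 into the zero table
theorem phase1 (m : Nat) (hm : 7 ≤ m) :
    (PySem.List.pyRange 1 7 1).foldl (fun dp (i : Int) => dp.set i.toNat i) (List.replicate m (0:Int))
    = [0, 1, 2, 3, 4, 5, 6] ++ List.replicate (m - 7) 0 := by
  obtain ⟨k, rfl⟩ : ∃ k, m = 7 + k := ⟨m - 7, by omega⟩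
  rw [show (7:Nat) + k - 7 = k by omega,
      show List.replicate (7 + k) (0:Int) = 0::0::0::0::0::0::0:: List.replicate k 0 by
        rw [List.replicate_add]; rfl,
      show PySem.List.pyRange 1 7 1 = [1,2,3,4,5,6] by decide]
  rfl

-- A's outer loop invariant
theorem outer_fold (N : Nat) (hN : 7 ≤ N) : ∀ n : Nat, 6 ≤ n → n ≤ N →
    (PySem.List.pyRange 7 ((n : Int) + 1) 1).foldl (fun dp i =>
      (PySem.List.pyRange (i - 3) 0 (-1)).foldl (fun dp j =>
        dp.set i.toNat (max (PySem.List.pyGetD dp i 0) (PySem.List.pyGetD dp j 0 * (i - j - 1)))) dp)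
      ([0, 1, 2, 3, 4, 5, 6] ++ List.replicate (N + 1 - 7) 0)
    = pvG n ++ List.replicate (N - n) 0 := by
  intro n hn
  induction n, hn using Nat.le_induction with
  | base =>
    intro _
    rw [PySem.List.pyRange_one_eq_nil (by norm_num)]
    rw [show pvG 6 = [0,1,2,3,4,5,6] by decide, show N + 1 - 7 = N - 6 by omega]
    rfl
  | succ n hn ih =>
    intro hle
    rw [show ((n + 1 : Nat) : Int) + 1 = ((n : Int) + 1) + 1 by push_cast; ring,
        PySem.List.pyRange_one_succ_right (by omega), List.foldl_append, ih (by omega)]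
    simp only [List.foldl]
    rw [show List.replicate (N - n) (0:Int) = 0 :: List.replicate (N - (n + 1)) 0 by
          rw [show N - n = (N - (n+1)) + 1 by omega]; rfl]
    rw [inner_fold ((n:Int) + 1) (pvG n) _ (by rw [length_pvG]; omega) (by omega) _ 0
          (fun j hj => by rw [PySem.List.mem_pyRange_neg_one] at hj; exact ⟨by omega, by omega⟩)]
    rw [pvG_succ n]
    simp only [List.append_assoc, List.cons_append, List.nil_append]
    congr 2
    rw [pvg_big (show 7 ≤ n + 1 by omega),
        show ((n + 1 : Nat) : Int) = (n : Int) + 1 by push_cast; ring]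
    apply PySem.List.foldl_congr_mem
    intro acc j hj
    rw [PySem.List.mem_pyRange_neg_one] at hj
    rw [PySem.List.pyGetD_of_nonneg _ _ (by omega), getD_pvG (show j.toNat ≤ n by omega)]

theorem a_eq (N : Int) (h : 7 ≤ N) : optimalKeys N = pvg N.toNat := by
  simp only [optimalKeys, if_neg (show ¬ N ≤ 6 by omega)]
  rw [show (N + 1).toNat = N.toNat + 1 by omega]
  rw [phase1 (N.toNat + 1) (by omega)]
  have := outer_fold N.toNat (by omega) N.toNat (by omega) (le_refl _)
  rw [show ((N.toNat : Nat) : Int) = N by omega] at this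
  rw [this, Nat.sub_self]
  simp only [List.replicate_zero, List.append_nil]
  rw [PySem.List.pyGetD_of_nonneg _ _ (by omega), getD_pvG (le_refl _)]

theorem alt_eq (N : Int) (h : 7 ≤ N) : optimalKeys_alt N = pvg N.toNat := by
  simp only [optimalKeys_alt, if_neg (show ¬ N ≤ 6 by omega)]
  have := alt_fold N.toNat (by omega)
  rw [show ((N.toNat : Nat) : Int) = N by omega] at this
  rw [this, PySem.List.pyGetD_of_nonneg _ _ (by omega), getD_pvG (le_refl _)]

-- ===== VERDICT (by name: the statement is the Claim_ definition above) =====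
theorem optimalKeys_spec : Claim_equal_optimalKeys := by
  intro N _
  unfold Spec_optimalKeys
  by_cases h : N ≤ 6
  · simp [optimalKeys, optimalKeys_alt, h]
  · rw [a_eq N (by omega), alt_eq N (by omega)]
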